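-- pv_equiv track=rewrite | github.com/cshhong/TrussFrameASAP | TrussFrameMechanics/mcts_test.py | get_mcts_size
-- ===== SOURCE A (Python) =====
-- def get_mcts_size(steps):
--     '''
--     Calculate the number of nodes within state tree for cantilever env
--     Output a list of (i, total) pairs
--     '''
--     total = 0
--     curr_level = 1
--     results = []
--
--     for i in range(steps):
--         total += curr_level
--         next_level = curr_level * (curr_level + 2)
--         curr_level = next_level
--         # Collect the (i, total) pair
--         results.append((i, total))
--
--     return results
-- ===== SOURCE B (Python) =====
-- def get_mcts_size(steps):
--     # Closed form: since (curr+1) squares at each step, level k holds 2**(2**k) - 1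
--     # nodes, so the running total at index i is sum_{k<=i} 2**(2**k) minus (i+1).
--     # Stateless: each pair is computed directly, no recurrence or accumulator carried.
--     return [(i, sum(1 << (1 << k) for k in range(i + 1)) - (i + 1)) for i in range(steps)]
-- ===== Notes on version B (the rewrite author's own statement) =====
-- stated objective: alternative
-- what changed: Replaces the interleaved recurrence/accumulator loop with a stateless closed form: since curr+1 squares each step, level k has 2**(2**k)-1 nodes, so entry i is computed directly as sum(2**(2**k) for k<=i) - (i+1) with no carried state.
import Mathlib
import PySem

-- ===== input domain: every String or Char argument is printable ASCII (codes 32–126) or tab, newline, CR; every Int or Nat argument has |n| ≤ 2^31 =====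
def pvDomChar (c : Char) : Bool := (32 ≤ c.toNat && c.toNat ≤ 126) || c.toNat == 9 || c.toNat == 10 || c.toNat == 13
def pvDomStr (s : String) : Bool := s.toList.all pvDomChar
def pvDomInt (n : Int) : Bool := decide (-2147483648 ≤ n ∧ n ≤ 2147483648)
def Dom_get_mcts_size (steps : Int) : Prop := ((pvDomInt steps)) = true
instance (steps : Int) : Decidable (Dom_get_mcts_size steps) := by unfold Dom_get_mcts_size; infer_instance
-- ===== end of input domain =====

-- B drops A's recurrence and accumulator: level k holds 2^(2^k) - 1 nodes (curr+1
-- squares each step), so each (i, total) pair is computed directly from the closed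
-- form sum_{k<=i} 2^(2^k) - (i+1) (objective: alternative, stateless closed form).

-- ===== PORT A =====
-- one interleaved loop over range(steps) carrying (total, curr_level, results)
def get_mcts_size (steps : Int) : List (Int × Int) :=
  let st := (PySem.List.pyRange 0 steps 1).foldl
    (fun (st : Int × Int × List (Int × Int)) i =>
      let total := st.1 + st.2.1
      let next_level := st.2.1 * (st.2.1 + 2)
      (total, next_level, st.2.2 ++ [(i, total)]))
    (0, 1, [])
  st.2.2

-- ===== PORT B =====
-- Source B's comprehension: for each i, the pair is computed directly from the closed
-- form; 1 << (1 << k) is 2^(2^k), sum(...) over range(i+1) is the inner fold.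
def get_mcts_size_alt (steps : Int) : List (Int × Int) :=
  (PySem.List.pyRange 0 steps 1).map (fun i =>
    (i, (PySem.List.pyRange 0 (i + 1) 1).foldl
          (fun s k => s + 2 ^ (2 ^ k.toNat)) 0 - (i + 1)))

-- ===== PRECONDITION & SPEC =====
def Spec_get_mcts_size (steps : Int) (out : List (Int × Int)) : Prop := out = get_mcts_size_alt steps
instance (steps : Int) (out : List (Int × Int)) : Decidable (Spec_get_mcts_size steps out) := by unfold Spec_get_mcts_size; infer_instance

-- ===== CLAIM (what is proved, stated in full; the proofs are below) =====
def Claim_equal_get_mcts_size : Prop := ∀ (steps : Int), Dom_get_mcts_size steps → Spec_get_mcts_size steps (get_mcts_size steps)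

-- ===== LEMMAS AND PROOFS =====

-- S n = sum_{k<n} 2^(2^k), the running power sum of the closed form.
def pvS : Nat → Int
  | 0 => 0
  | n + 1 => pvS n + 2 ^ (2 ^ n)

-- A's loop body, named so the invariant reads cleanly.
def pvStepA (st : Int × Int × List (Int × Int)) (i : Int) : Int × Int × List (Int × Int) :=
  let total := st.1 + st.2.1
  (total, st.2.1 * (st.2.1 + 2), st.2.2 ++ [(i, total)])

-- the closed-form pair B computes (with the inner sum already evaluated)
def pvPair (i : Int) : Int × Int := (i, pvS (i.toNat + 1) - (i + 1))

theorem pvTwoPow_succ (n : Nat) : (2 : Int) ^ (2 ^ (n + 1)) = 2 ^ (2 ^ n) * 2 ^ (2 ^ n) := by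
  rw [← pow_add]
  congr 1
  rw [pow_succ]
  omega

-- B's inner fold over range(m) computes pvS m.
theorem pvInnerFold (m : Nat) :
    (PySem.List.pyRange 0 (m : Int) 1).foldl (fun s k => s + 2 ^ (2 ^ k.toNat)) 0 = pvS m := by
  induction m with
  | zero => simp [pvS]
  | succ p ih =>
    rw [show ((p + 1 : Nat) : Int) = (p : Int) + 1 from by push_cast; ring,
      PySem.List.pyRange_one_succ_right (by positivity : (0 : Int) ≤ (p : Int)),
      List.foldl_append, ih]
    simp [pvS]

-- A's loop invariant: after n iterations the state is the closed form.
theorem pvAInv (n : Nat) :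
    (PySem.List.pyRange 0 (n : Int) 1).foldl pvStepA (0, 1, []) =
      (pvS n - n, 2 ^ (2 ^ n) - 1, (PySem.List.pyRange 0 (n : Int) 1).map pvPair) := by
  induction n with
  | zero => simp [pvS]
  | succ p ih =>
    rw [show ((p + 1 : Nat) : Int) = (p : Int) + 1 from by push_cast; ring,
      PySem.List.pyRange_one_succ_right (by positivity : (0 : Int) ≤ (p : Int)),
      List.foldl_append, ih, List.map_append]
    simp only [List.foldl_cons, List.foldl_nil, pvStepA, List.map_cons, List.map_nil, pvPair]
    refine Prod.ext ?_ (Prod.ext ?_ ?_)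
    · simp [pvS]; ring
    · simp [pvTwoPow_succ]; ring
    · simp [pvS, Int.toNat_natCast]; ring

-- ===== VERDICT (by name: the statement is the Claim_ definition above) =====
theorem get_mcts_size_spec : Claim_equal_get_mcts_size := by
  intro steps _
  unfold Spec_get_mcts_size get_mcts_size get_mcts_size_alt
  by_cases h : steps ≤ 0
  · simp [PySem.List.pyRange_one_eq_nil h]
  · have hsteps : steps = (steps.toNat : Int) := by omega
    rw [hsteps]
    show (List.foldl pvStepA (0, 1, []) (PySem.List.pyRange 0 ((steps.toNat : Nat) : Int) 1)).2.2 = _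
    rw [pvAInv]
    simp only
    apply List.map_congr_left
    intro i hi
    have h0i : 0 ≤ i := (PySem.List.mem_pyRange_one.mp hi).1
    have : i + 1 = ((i.toNat + 1 : Nat) : Int) := by omega
    rw [this, pvInnerFold, pvPair, ← this]
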